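-- pv_equiv track=rewrite | github.com/jprodcc-rodc/throughline | filter/openwebui_filter.py | _build_recall_judge_user_msg
-- ===== SOURCE A (Python) =====
-- def _build_recall_judge_user_msg(messages: list, current_query: str) -> str:
--     """Build the user-role message for the RecallJudge: the last 6 user/assistant
--     turns wrapped in <recent_history>, plus <current_query>. The current user message
--     is already extracted separately and is stripped from the history list."""
--     parts = []
--     hist = []
--     for m in messages:
--         if not isinstance(m, dict):
--             continue  # defensive: skip non-dict entries
--         role = m.get("role", "")
--         if role not in ("user", "assistant"):
--             continue
--         content = m.get("content", "")
--         if isinstance(content, list):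
--             text = ""
--             for c in content:
--                 if isinstance(c, dict) and c.get("type") == "text":
--                     text = c.get("text", "") or ""
--                     break
--             content = text
--         hist.append({"role": role, "content": str(content)})
--     # The current user message is the last entry — drop it.
--     if hist and hist[-1]["role"] == "user":
--         hist = hist[:-1]
--     # Keep only the last 6 turns.
--     hist = hist[-6:]
--     if hist:
--         lines = []
--         for h in hist:
--             snippet = (h["content"] or "")[:300]
--             lines.append(f"{h['role']}: {snippet}")
--         parts.append("<recent_history>\n" + "\n".join(lines) + "\n</recent_history>")
--     parts.append(f"<current_query>{current_query}</current_query>")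
--     return "\n".join(parts)
-- ===== SOURCE B (Python) =====
-- def _build_recall_judge_user_msg(messages: list, current_query: str) -> str:
--     """Same prompt, built back-to-front: walk messages from the end, skip the
--     trailing current user message, keep at most 6 valid turns, then reverse."""
--     turns = []
--     seen_first = False
--     for m in reversed(messages):
--         if not isinstance(m, dict):
--             continue
--         role = m.get("role", "")
--         if role not in ("user", "assistant"):
--             continue
--         content = m.get("content", "")
--         if isinstance(content, list):
--             text = ""
--             for c in content:
--                 if isinstance(c, dict) and c.get("type") == "text":
--                     text = c.get("text", "") or ""
--                     break
--             content = text
--         content = str(content)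
--         if not seen_first:
--             seen_first = True
--             if role == "user":
--                 continue  # the current query, already stripped from the history
--         if len(turns) == 6:
--             break
--         turns.append((role, content))
--     msg = f"<current_query>{current_query}</current_query>"
--     if turns:
--         lines = "\n".join(f"{r}: {c[:300]}" for r, c in reversed(turns))
--         msg = f"<recent_history>\n{lines}\n</recent_history>\n{msg}"
--     return msg
-- ===== Notes on version B (the rewrite author's own statement) =====
-- stated objective: alternative
-- what changed: B builds the history back-to-front: a single reverse scan that skips the trailing user turn and stops after 6 kept turns, then reverses the bounded buffer, instead of A's filter-everything forward pass followed by drop-last and [-6:] slicing.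
import Mathlib
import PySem

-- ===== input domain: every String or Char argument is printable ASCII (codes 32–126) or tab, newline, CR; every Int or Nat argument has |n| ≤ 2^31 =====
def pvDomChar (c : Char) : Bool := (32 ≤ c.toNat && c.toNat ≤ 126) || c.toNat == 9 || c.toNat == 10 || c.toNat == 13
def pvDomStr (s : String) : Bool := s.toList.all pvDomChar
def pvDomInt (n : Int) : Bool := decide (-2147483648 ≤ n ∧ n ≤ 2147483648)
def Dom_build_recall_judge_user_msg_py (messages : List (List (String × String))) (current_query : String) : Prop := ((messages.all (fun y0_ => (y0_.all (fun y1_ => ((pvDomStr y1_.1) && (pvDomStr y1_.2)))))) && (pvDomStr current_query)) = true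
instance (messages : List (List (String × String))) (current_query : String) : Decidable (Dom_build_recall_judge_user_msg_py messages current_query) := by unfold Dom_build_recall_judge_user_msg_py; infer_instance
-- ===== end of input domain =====

-- B rebuilds the same prompt back-to-front (single bounded reverse scan instead of
-- filter-everything-then-drop-and-slice); objective: alternative decomposition, same output.

-- m.get(key, default) on a dict given as an association list (first match wins)
def pvGetD (m : List (String × String)) (k dflt : String) : String :=
  PySem.Dict.getD (PySem.Dict.mk m) k dflt

-- ===== PORT A =====
-- In the Lean type every entry is a dict of strings, so `isinstance(m, dict)` is
-- always true, the `isinstance(content, list)` branch never fires and `str(content)`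
-- is the identity; those dead branches are omitted. `(content or "")` is kept
-- literally as `if c = "" then "" else c`.
def build_recall_judge_user_msg_py (messages : List (List (String × String))) (current_query : String) : String :=
  let hist : List (String × String) := messages.foldl (fun hist m =>
    let role := pvGetD m "role" ""
    if role = "user" ∨ role = "assistant" then
      hist ++ [(role, pvGetD m "content" "")]
    else hist) []
  -- if hist and hist[-1]["role"] == "user": hist = hist[:-1]
  let hist := if hist ≠ [] ∧ (PySem.List.pyGet? hist (-1)).map Prod.fst = some "user"
              then PySem.List.slice hist none (some (-1)) else hist
  -- hist = hist[-6:]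
  let hist := PySem.List.slice hist (some (-6)) none
  let parts : List String :=
    if hist ≠ [] then
      let lines : List String := hist.foldl (fun lines h =>
        lines ++ [h.1 ++ ": " ++ PySem.Str.slice (if h.2 = "" then "" else h.2) none (some 300)]) []
      ["<recent_history>" ++ "\n" ++ PySem.Str.join "\n" lines ++ "\n" ++ "</recent_history>"]
    else []
  let parts := parts ++ ["<current_query>" ++ current_query ++ "</current_query>"]
  PySem.Str.join "\n" parts

-- ===== PORT B =====
-- the reversed-loop of Source B: walk `reversed(messages)`, skip the trailing user turn,
-- stop after 6 kept turns (`break` = returning `turns`)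
def pvCollectB : List (List (String × String)) → Bool → List (String × String) → List (String × String)
  | [], _, turns => turns
  | m :: rest, seenFirst, turns =>
    let role := pvGetD m "role" ""
    if role = "user" ∨ role = "assistant" then
      if seenFirst = false ∧ role = "user" then
        pvCollectB rest true turns
      else if turns.length = 6 then turns
      else pvCollectB rest true (turns ++ [(role, pvGetD m "content" "")])
    else pvCollectB rest seenFirst turns

def build_recall_judge_user_msg_py_alt (messages : List (List (String × String))) (current_query : String) : String :=
  let turns := pvCollectB messages.reverse false []
  let msg := "<current_query>" ++ current_query ++ "</current_query>"
  if turns ≠ [] then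
    let lines := PySem.Str.join "\n"
      (turns.reverse.map (fun h => h.1 ++ ": " ++ PySem.Str.slice h.2 none (some 300)))
    "<recent_history>" ++ "\n" ++ lines ++ "\n" ++ "</recent_history>" ++ "\n" ++ msg
  else msg

-- ===== PRECONDITION & SPEC =====
def Spec_build_recall_judge_user_msg_py (messages : List (List (String × String))) (current_query : String) (out : String) : Prop := out = build_recall_judge_user_msg_py_alt messages current_query
instance (messages : List (List (String × String))) (current_query : String) (out : String) : Decidable (Spec_build_recall_judge_user_msg_py messages current_query out) := by unfold Spec_build_recall_judge_user_msg_py; infer_instance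

-- ===== CLAIM (what is proved, stated in full; the proofs are below) =====
def Claim_equal_build_recall_judge_user_msg_py : Prop := ∀ (messages : List (List (String × String))) (current_query : String), Dom_build_recall_judge_user_msg_py messages current_query → Spec_build_recall_judge_user_msg_py messages current_query (build_recall_judge_user_msg_py messages current_query)

-- ===== LEMMAS AND PROOFS =====

-- the role/content extraction both loops perform
def pvValid (m : List (String × String)) : Option (String × String) :=
  let role := pvGetD m "role" ""
  if role = "user" ∨ role = "assistant" then some (role, pvGetD m "content" "") else none

-- drop a trailing "user" turn (A's guarded hist[:-1] step)
def pvDropLastUser (l : List (String × String)) : List (String × String) :=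
  if l ≠ [] ∧ (PySem.List.pyGet? l (-1)).map Prod.fst = some "user"
  then PySem.List.slice l none (some (-1)) else l

-- drop a leading "user" turn (what B's first-valid skip does on the reversed list)
def pvDropHeadUser : List (String × String) → List (String × String)
  | [] => []
  | p :: t => if p.1 = "user" then t else p :: t

lemma pvFoldA (ms : List (List (String × String))) (acc : List (String × String)) :
    ms.foldl (fun hist m =>
      let role := pvGetD m "role" ""
      if role = "user" ∨ role = "assistant" then
        hist ++ [(role, pvGetD m "content" "")]
      else hist) acc = acc ++ ms.filterMap pvValid := by
  induction ms generalizing acc with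
  | nil => simp
  | cons m rest ih =>
    simp only [List.foldl_cons, List.filterMap_cons, pvValid, ih]
    split <;> simp

-- the collector on a pair list (the valid-entry filter already applied)
def pvCollectF : List (String × String) → Bool → List (String × String) → List (String × String)
  | [], _, turns => turns
  | p :: rest, seenFirst, turns =>
    if seenFirst = false ∧ p.1 = "user" then pvCollectF rest true turns
    else if turns.length = 6 then turns
    else pvCollectF rest true (turns ++ [p])

lemma pvCollectB_eq_F (ms : List (List (String × String))) (b : Bool) (t : List (String × String)) :
    pvCollectB ms b t = pvCollectF (ms.filterMap pvValid) b t := by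
  induction ms generalizing b t with
  | nil => rfl
  | cons m rest ih =>
    simp only [pvCollectB, pvValid, List.filterMap_cons]
    split
    · simp only [pvCollectF]
      split
      · exact ih _ _
      · split
        · rfl
        · exact ih _ _
    · exact ih _ _

lemma pvCollectF_true (t acc : List (String × String)) (h : acc.length ≤ 6) :
    pvCollectF t true acc = acc ++ t.take (6 - acc.length) := by
  induction t generalizing acc with
  | nil => simp [pvCollectF]
  | cons p rest ih =>
    simp only [pvCollectF]
    rw [if_neg (by simp)]
    by_cases h6 : acc.length = 6
    · rw [if_pos h6, h6]; simp
    · rw [if_neg h6, ih _ (by simp; omega)]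
      have h7 : 6 - acc.length = (6 - (acc.length + 1)) + 1 := by omega
      simp only [List.length_append, List.length_cons, List.length_nil, Nat.zero_add, h7,
        List.take_succ_cons, List.append_assoc, List.cons_append, List.nil_append]

lemma pvCollectF_spec (r : List (String × String)) :
    pvCollectF r false [] = (pvDropHeadUser r).take 6 := by
  cases r with
  | nil => rfl
  | cons p t =>
    simp only [pvCollectF, pvDropHeadUser]
    by_cases hu : p.1 = "user"
    · rw [if_pos (by simp [hu]), if_pos hu, pvCollectF_true t [] (by simp)]; simp
    · rw [if_neg (by simp [hu]), if_neg hu, if_neg (by simp)]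
      simp only [List.nil_append]
      rw [pvCollectF_true t [p] (by simp)]
      simp [List.take_succ_cons]

-- B's collected buffer is exactly the reverse of A's trimmed history
lemma pvTurns_eq (ms : List (List (String × String))) :
    pvCollectB ms.reverse false [] =
      (PySem.List.slice (pvDropLastUser (ms.filterMap pvValid)) (some (-6)) none).reverse := by
  rw [pvCollectB_eq_F, List.filterMap_reverse, pvCollectF_spec]
  have hslice : ∀ l : List (String × String),
      PySem.List.slice l (some (-6)) none = l.drop (l.length - 6) := by
    intro l; simp [PySem.List.slice]
  rw [hslice]
  generalize ms.filterMap pvValid = F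
  induction F using List.reverseRecOn with
  | nil => simp [pvDropLastUser, pvDropHeadUser]
  | append_singleton xs x _ =>
    have hrev : (xs ++ [x]).reverse = x :: xs.reverse := by simp
    rw [hrev]
    simp only [pvDropHeadUser]
    have hget : (PySem.List.pyGet? (xs ++ [x]) (-1)).map Prod.fst = some x.1 := by
      simp [PySem.List.pyGet?, PySem.List.pyIdx?]
    by_cases hu : x.1 = "user"
    · rw [if_pos hu]
      have hd : pvDropLastUser (xs ++ [x]) = xs := by
        simp only [pvDropLastUser]
        rw [if_pos ⟨by simp, by rw [hget, hu]⟩, PySem.List.slice_to_neg_one]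
        exact List.dropLast_concat
      rw [hd, List.take_reverse]
    · rw [if_neg hu]
      have hd : pvDropLastUser (xs ++ [x]) = xs ++ [x] := by
        simp only [pvDropLastUser]
        rw [if_neg]
        rintro ⟨-, hc⟩
        rw [hget] at hc
        exact hu (Option.some.inj hc)
      rw [hd, ← hrev, List.take_reverse]

lemma pvIfEmpty (c : String) : (if c = "" then "" else c) = c := by
  split <;> simp_all

-- ===== VERDICT (by name: the statement is the Claim_ definition above) =====
theorem build_recall_judge_user_msg_py_spec : Claim_equal_build_recall_judge_user_msg_py := by
  intro messages current_query _
  show build_recall_judge_user_msg_py messages current_query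
      = build_recall_judge_user_msg_py_alt messages current_query
  simp only [build_recall_judge_user_msg_py, build_recall_judge_user_msg_py_alt]
  rw [pvFoldA, List.nil_append, pvTurns_eq, List.reverse_reverse]
  rw [show (if (messages.filterMap pvValid) ≠ [] ∧
        (PySem.List.pyGet? (messages.filterMap pvValid) (-1)).map Prod.fst = some "user"
      then PySem.List.slice (messages.filterMap pvValid) none (some (-1))
      else (messages.filterMap pvValid)) = pvDropLastUser (messages.filterMap pvValid) from rfl]
  set h := PySem.List.slice (pvDropLastUser (messages.filterMap pvValid)) (some (-6)) none with hh
  by_cases hne : h = []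
  · simp only [hne, ne_eq, not_true_eq_false, if_false, List.reverse_nil, List.nil_append]
    rw [← String.toList_inj]
    simp [PySem.Str.toList_join, PySem.Chars.join_singleton]
  · have hlines : h.foldl (fun lines p =>
        lines ++ [p.1 ++ ": " ++ PySem.Str.slice (if p.2 = "" then "" else p.2) none (some 300)]) []
        = h.map (fun p => p.1 ++ ": " ++ PySem.Str.slice p.2 none (some 300)) := by
      rw [PySem.List.foldl_append_singleton_eq_map, List.nil_append]
      exact List.map_congr_left (fun p _ => by rw [pvIfEmpty])
    rw [if_pos hne, if_pos (by simp [hne]), hlines, ← String.toList_inj]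
    simp [PySem.Str.toList_join, PySem.Chars.join_cons_cons, PySem.Chars.join_singleton]
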